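-- pv_equiv track=rewrite | github.com/pandas-dev/pandas | pandas/core/indexes/multi.py | _sparsify
-- ===== SOURCE A (Python) =====
-- def _sparsify(label_list, start: int = 0, sentinel=""):
--     pivoted = list(zip(*label_list))
--     k = len(label_list)
--
--     result = pivoted[: start + 1]
--     prev = pivoted[start]
--
--     for cur in pivoted[start + 1 :]:
--         sparse_cur = []
--
--         for i, (p, t) in enumerate(zip(prev, cur)):
--             if i == k - 1:
--                 sparse_cur.append(t)
--                 result.append(sparse_cur)
--                 break
--
--             if p == t:
--                 sparse_cur.append(sentinel)
--             else:
--                 sparse_cur.extend(cur[i:])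
--                 result.append(sparse_cur)
--                 break
--
--         prev = cur
--
--     return list(zip(*result))
-- ===== SOURCE B (Python) =====
-- def _sparsify(label_list, start: int = 0, sentinel=""):
--     # Column-major sparsify: per-row "still matching" flags replace A's
--     # row-major break loop; same transpose framing and return value.
--     pivoted = list(zip(*label_list))
--     k = len(label_list)
--     prefix = pivoted[: start + 1]
--     chain = [pivoted[start]] + pivoted[start + 1 :]
--     pairs = list(zip(chain, chain[1:]))
--     flags = [True] * len(pairs)
--     cols = []
--     for i in range(k):
--         rows = [(sentinel if f and a[i] == b[i] and i < k - 1 else b[i],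
--                  f and a[i] == b[i])
--                 for f, (a, b) in zip(flags, pairs)]
--         cols.append([c for c, _ in rows])
--         flags = [g for _, g in rows]
--     return list(zip(*(prefix + list(zip(*cols)))))
-- ===== Notes on version B (the rewrite author's own statement) =====
-- stated objective: alternative
-- what changed: Replaces A's row-major scan with an early-exit break per row by a column-major pass over the levels that carries a per-row 'still matching' boolean, assembling the sparsified block from whole columns and transposing it back.
import Mathlib
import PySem

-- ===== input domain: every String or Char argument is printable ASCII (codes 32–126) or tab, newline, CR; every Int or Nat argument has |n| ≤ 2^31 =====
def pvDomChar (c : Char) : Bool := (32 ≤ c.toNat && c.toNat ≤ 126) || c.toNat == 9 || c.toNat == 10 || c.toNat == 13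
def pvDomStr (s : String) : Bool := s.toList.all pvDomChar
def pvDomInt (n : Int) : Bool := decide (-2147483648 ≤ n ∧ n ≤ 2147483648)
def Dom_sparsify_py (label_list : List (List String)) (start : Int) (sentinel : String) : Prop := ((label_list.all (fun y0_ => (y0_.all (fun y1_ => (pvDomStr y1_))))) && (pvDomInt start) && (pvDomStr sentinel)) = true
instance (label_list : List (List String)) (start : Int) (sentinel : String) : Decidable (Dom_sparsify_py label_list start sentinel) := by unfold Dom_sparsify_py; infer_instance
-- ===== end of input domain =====

-- B replaces A's row-major break loop by a column-major pass with per-row "matching" flags (alternative decomposition, same cost).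


-- ===== PORT A =====
-- list(zip(*ls)) : rows = min of the lengths, each row reads one index from every
-- list; exact for Python's variadic zip (getD is exact: r < every length).
def pyZip (ls : List (List String)) : List (List String) :=
  (List.range (((ls.map List.length).min?).getD 0)).map (fun r => ls.map (fun t => t.getD r ""))

-- A's inner 'for i, (p, t) in enumerate(zip(prev, cur))' loop; 'some row' = the loop
-- broke and appended 'row' to result, 'none' = the loop fell through without a break.
-- t.getD is exact: every index used is in range; cur[i:] is PySem.List.slice.
def aInner (k : Nat) (sentinel : String) (cur : List String) :
    List (String × String) → Nat → List String → Option (List String)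
  | [], _, _ => none
  | (p, t) :: rest, i, acc =>
    if i = k - 1 then some (acc ++ [t])
    else if p == t then aInner k sentinel cur rest (i + 1) (acc ++ [sentinel])
    else some (acc ++ PySem.List.slice cur (some (i : Int)) none)

-- A's outer 'for cur in pivoted[start+1:]' loop, threading prev and result.
def aOuter (k : Nat) (sentinel : String) :
    List (List String) → List String → List (List String) → List (List String)
  | [], _, result => result
  | cur :: more, prev, result =>
    match aInner k sentinel cur (prev.zip cur) 0 [] with
    | some row => aOuter k sentinel more cur (result ++ [row])
    | none => aOuter k sentinel more cur result

def sparsify_py (label_list : List (List String)) (start : Int) (sentinel : String) : List (List String) :=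
  let pivoted := pyZip label_list
  let k := label_list.length
  let result := PySem.List.slice pivoted none (some (start + 1))
  match PySem.List.pyGet? pivoted start with
  | none => []  -- pivoted[start] raises IndexError (excluded by Pre_)
  | some prev => pyZip (aOuter k sentinel (PySem.List.slice pivoted (some (start + 1)) none) prev result)

-- ===== PORT B =====
-- Transliteration of Source B: same pivoted/prefix/chain/pairs setup, then the
-- column-major fold over range(k) carrying (cols, flags); a[i]/b[i] as getD
-- (exact: i < k = length of every row).
def sparsify_py_alt (label_list : List (List String)) (start : Int) (sentinel : String) : List (List String) :=
  let pivoted := pyZip label_list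
  let k := label_list.length
  let pref := PySem.List.slice pivoted none (some (start + 1))
  match PySem.List.pyGet? pivoted start with
  | none => []  -- pivoted[start] raises IndexError in Source B too (excluded by Pre_)
  | some p0 =>
    let chain := p0 :: PySem.List.slice pivoted (some (start + 1)) none
    let pairs := chain.zip (PySem.List.slice chain (some 1) none)
    let flags := pairs.map (fun _ => true)
    let st := (List.range k).foldl
      (fun (acc : List (List String) × List Bool) i =>
        let rows := (acc.2.zip pairs).map (fun ft =>
          ((if ft.1 && (ft.2.1.getD i "" == ft.2.2.getD i "") && decide (i < k - 1)
            then sentinel else ft.2.2.getD i ""),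
           ft.1 && (ft.2.1.getD i "" == ft.2.2.getD i "")))
        (acc.1 ++ [rows.map Prod.fst], rows.map Prod.snd))
      ([], flags)
    pyZip (pref ++ pyZip st.1)

-- ===== PRECONDITION & SPEC =====
-- Pre_ excludes exactly the inputs where A raises IndexError at pivoted[start]:
-- start must be a valid Python index into the zipped rows (their number is the
-- minimum level length; empty label_list gives 0 rows).
def Pre_sparsify_py (label_list : List (List String)) (start : Int) (sentinel : String) : Prop :=
  PySem.Raise.InRange (((label_list.map List.length).min?).getD 0) start
instance (label_list : List (List String)) (start : Int) (sentinel : String) : Decidable (Pre_sparsify_py label_list start sentinel) := by unfold Pre_sparsify_py; infer_instance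
def pvWitness_sparsify_py : List (List String) × Int × String := ([["a", "a", "b"], ["x", "y", "y"]], 0, "")

def Spec_sparsify_py (label_list : List (List String)) (start : Int) (sentinel : String) (out : List (List String)) : Prop := out = sparsify_py_alt label_list start sentinel
instance (label_list : List (List String)) (start : Int) (sentinel : String) (out : List (List String)) : Decidable (Spec_sparsify_py label_list start sentinel out) := by unfold Spec_sparsify_py; infer_instance

-- ===== CLAIM (what is proved, stated in full; the proofs are below) =====
def Claim_equal_sparsify_py : Prop := ∀ (label_list : List (List String)) (start : Int) (sentinel : String), Dom_sparsify_py label_list start sentinel → Pre_sparsify_py label_list start sentinel → Spec_sparsify_py label_list start sentinel (sparsify_py label_list start sentinel)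

-- ===== LEMMAS AND PROOFS =====

-- The common specification of one sparsified row: cell i is the sentinel iff all
-- levels before i matched, level i matches, and i is not the last level.
def allEq (a b : List String) (i : Nat) : Bool :=
  (List.range i).all (fun j => a.getD j "" == b.getD j "")

def cell (sentinel : String) (k : Nat) (a b : List String) (i : Nat) : String :=
  if allEq a b i && (a.getD i "" == b.getD i "") && decide (i < k - 1) then sentinel
  else b.getD i ""

def rowF (sentinel : String) (k : Nat) (pr : List String × List String) : List String :=
  (List.range k).map (cell sentinel k pr.1 pr.2)

lemma pyZip_length (ls : List (List String)) :
    (pyZip ls).length = ((ls.map List.length).min?).getD 0 := by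
  simp [pyZip]

lemma mem_pyZip_length (ls : List (List String)) (row : List String) (h : row ∈ pyZip ls) :
    row.length = ls.length := by
  simp only [pyZip, List.mem_map, List.mem_range] at h
  obtain ⟨r, _, rfl⟩ := h
  simp

lemma drop_eq_map_range' (b : List String) (i : Nat) (h : i ≤ b.length) :
    b.drop i = (List.range' i (b.length - i)).map (fun j => b.getD j "") := by
  apply List.ext_getElem
  · simp
  · intro n h1 h2
    simp only [List.getElem_drop, List.getElem_map, List.getElem_range']
    rw [List.getD_eq_getElem]
    · simp
    · simp at h1; omega

lemma allEq_true_of (a b : List String) (i : Nat)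
    (h : ∀ j, j < i → (a.getD j "" == b.getD j "") = true) : allEq a b i = true := by
  simp only [allEq, List.all_eq_true, List.mem_range]
  exact fun j hj => h j hj

lemma aInner_spec (k : Nat) (sentinel : String) (a b : List String)
    (ha : a.length = k) (hb : b.length = k) :
    ∀ m i acc, k - i = m → (∀ j, j < i → (a.getD j "" == b.getD j "") = true) →
    aInner k sentinel b ((a.drop i).zip (b.drop i)) i acc =
      if i < k then some (acc ++ (List.range' i (k - i)).map (cell sentinel k a b)) else none := by
  intro m
  induction m with
  | zero =>
    intro i acc hm _
    have hik : k ≤ i := by omega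
    rw [List.drop_eq_nil_of_le (by omega)]
    simp [aInner, Nat.not_lt.mpr hik]
  | succ m ih =>
    intro i acc hm hinv
    have hik : i < k := by omega
    have hia : i < a.length := by omega
    have hib : i < b.length := by omega
    rw [← List.getElem_cons_drop hia, ← List.getElem_cons_drop hib, List.zip_cons_cons]
    by_cases hlast : i = k - 1
    · simp only [aInner, if_pos hlast, if_pos hik]
      have h1 : k - i = 1 := by omega
      rw [h1]
      simp only [List.range'_one, List.map_cons, List.map_nil]
      have hc : cell sentinel k a b i = b.getD i "" := by
        simp [cell, hlast]
      rw [hc, List.getD_eq_getElem]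
    · have hik1 : i < k - 1 := by omega
      by_cases heq : a[i] == b[i]
      · simp only [aInner, if_neg hlast, if_pos heq]
        rw [if_pos hik]
        rw [ih (i + 1) (acc ++ [sentinel]) (by omega)
          (by intro j hj
              rcases Nat.lt_succ_iff_lt_or_eq.mp hj with h' | h'
              · exact hinv j h'
              · subst h'
                rw [List.getD_eq_getElem a "" hia, List.getD_eq_getElem b "" hib]
                exact heq)]
        rw [if_pos (show i + 1 < k by omega)]
        have hr : List.range' i (k - i) = i :: List.range' (i + 1) (k - (i + 1)) := by
          have : k - i = (k - (i + 1)) + 1 := by omega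
          rw [this, List.range'_succ]
        rw [hr]
        have hc : cell sentinel k a b i = sentinel := by
          simp only [cell]
          rw [if_pos]
          simp only [Bool.and_eq_true, decide_eq_true_eq]
          refine ⟨⟨allEq_true_of a b i hinv, ?_⟩, hik1⟩
          rw [List.getD_eq_getElem a "" hia, List.getD_eq_getElem b "" hib]
          exact heq
        simp [hc, List.append_assoc]
      · simp only [aInner, if_neg hlast, if_neg heq, if_pos hik]
        congr 1
        rw [PySem.List.slice_from_natCast]
        rw [drop_eq_map_range' b i (by omega), hb]
        congr 1
        apply List.map_congr_left
        intro j hj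
        have hj' : i ≤ j ∧ j < k := by
          have := List.mem_range'.mp hj
          omega
        have hja : j < a.length := by omega
        have hjb : j < b.length := by omega
        have hcond : (allEq a b j && (a.getD j "" == b.getD j "") && decide (j < k - 1)) = false := by
          rcases Nat.eq_or_lt_of_le hj'.1 with h' | h'
          · subst h'
            have hf : (a.getD i "" == b.getD i "") = false := by
              rw [List.getD_eq_getElem a "" hia, List.getD_eq_getElem b "" hib]
              exact Bool.eq_false_iff.mpr heq
            rw [hf]
            simp
          · have hf : allEq a b j = false := by
              apply Bool.eq_false_iff.mpr
              intro hall
              have := (List.all_eq_true.mp hall) i (List.mem_range.mpr h')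
              rw [List.getD_eq_getElem a "" hia, List.getD_eq_getElem b "" hib] at this
              exact heq this
            rw [hf]
            simp
        simp only [cell, hcond, Bool.false_eq_true, if_false]

lemma aOuter_spec (k : Nat) (sentinel : String) (hk : 0 < k) :
    ∀ (rest : List (List String)) (prev : List String) (result : List (List String)),
    prev.length = k → (∀ r ∈ rest, r.length = k) →
    aOuter k sentinel rest prev result = result ++ ((prev :: rest).zip rest).map (rowF sentinel k) := by
  intro rest
  induction rest with
  | nil => intro prev result _ _; simp [aOuter]
  | cons cur more ih =>
    intro prev result hprev hrest
    have hcur : cur.length = k := hrest cur (by simp)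
    have h0 := aInner_spec k sentinel prev cur hprev hcur k 0 [] (by omega) (by omega)
    simp only [List.drop_zero] at h0
    rw [if_pos hk] at h0
    simp only [aOuter, h0]
    rw [ih cur (result ++ [[] ++ (List.range' 0 (k - 0)).map (cell sentinel k prev cur)])
      hcur (fun r hr => hrest r (by simp [hr]))]
    simp only [List.zip_cons_cons, List.map_cons, List.append_assoc, List.nil_append,
      List.singleton_append, Nat.sub_zero]
    congr 2
    simp [rowF, List.range_eq_range']

lemma bFold (sentinel : String) (k : Nat) (pairs : List (List String × List String)) :
    ∀ n, (List.range n).foldl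
      (fun (acc : List (List String) × List Bool) i =>
        let rows := (acc.2.zip pairs).map (fun ft =>
          ((if ft.1 && (ft.2.1.getD i "" == ft.2.2.getD i "") && decide (i < k - 1)
            then sentinel else ft.2.2.getD i ""),
           ft.1 && (ft.2.1.getD i "" == ft.2.2.getD i "")))
        (acc.1 ++ [rows.map Prod.fst], rows.map Prod.snd))
      ([], pairs.map (fun _ => true)) =
      ((List.range n).map (fun i => pairs.map (fun pr => cell sentinel k pr.1 pr.2 i)),
       pairs.map (fun pr => allEq pr.1 pr.2 n)) := by
  intro n
  induction n with
  | zero => simp [allEq]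
  | succ n ih =>
    rw [List.range_succ, List.foldl_append, ih]
    simp only [List.foldl_cons, List.foldl_nil]
    have hzip : ∀ (ps : List (List String × List String)),
        (ps.map (fun pr => allEq pr.1 pr.2 n)).zip ps = ps.map (fun pr => (allEq pr.1 pr.2 n, pr)) := by
      intro ps
      induction ps with
      | nil => simp
      | cons h t iht => simp [iht]
    rw [hzip, List.map_map, List.map_map, List.map_map]
    simp only [Prod.mk.injEq]
    constructor
    · rw [List.map_append]
      congr 1
    · rw [List.map_map]
      apply List.map_congr_left
      intro pr _
      simp only [Function.comp, allEq, List.range_succ, List.all_append]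
      simp

lemma min?_const_getD (l : List Nat) (m : Nat) (hne : l ≠ []) (h : ∀ x ∈ l, x = m) :
    l.min?.getD 0 = m := by
  induction l with
  | nil => exact absurd rfl hne
  | cons a t ih =>
    have ha : a = m := h a (by simp)
    cases t with
    | nil => simp [List.min?, ha]
    | cons b t' =>
      have hb := ih (by simp) (fun x hx => h x (by simp [hx]))
      cases h' : (b :: t').min? with
      | none => simp [List.min?_cons] at h'
      | some v =>
        rw [h', Option.getD_some] at hb
        rw [List.min?_cons, h']
        simp [Option.elim, ha, hb]

lemma pyZip_cols (sentinel : String) (k : Nat) (hk : 0 < k)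
    (pairs : List (List String × List String)) :
    pyZip ((List.range k).map (fun i => pairs.map (fun pr => cell sentinel k pr.1 pr.2 i))) =
      pairs.map (rowF sentinel k) := by
  have hlen : (((List.range k).map (fun i => pairs.map (fun pr => cell sentinel k pr.1 pr.2 i))).map
      List.length).min?.getD 0 = pairs.length := by
    apply min?_const_getD
    · apply List.ne_nil_of_length_pos
      simp [hk]
    · intro x hx
      simp only [List.map_map, List.mem_map, Function.comp] at hx
      obtain ⟨i, _, rfl⟩ := hx
      simp
  simp only [pyZip, hlen]
  apply List.ext_getElem
  · simp
  · intro r h1 h2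
    simp only [List.getElem_map, List.getElem_range, rowF]
    apply List.ext_getElem
    · simp
    · intro i hi1 hi2
      simp only [List.getElem_map, List.getElem_range]
      rw [List.getD_eq_getElem _ "" (by simp; simpa using h2)]
      simp

theorem sparsify_py_spec : Claim_equal_sparsify_py := by
  intro ll start sentinel _ hpre
  unfold Spec_sparsify_py sparsify_py sparsify_py_alt
  simp only []
  have hlen : (pyZip ll).length = ((ll.map List.length).min?).getD 0 := pyZip_length ll
  cases hget : PySem.List.pyGet? (pyZip ll) start with
  | none =>
    exfalso
    rw [PySem.List.pyGet?_eq_none_iff, hlen] at hget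
    exact hget hpre
  | some prev =>
    have hn : 0 < ((ll.map List.length).min?).getD 0 := by
      unfold Pre_sparsify_py PySem.Raise.InRange at hpre
      omega
    have hllne : ll ≠ [] := by
      intro h; subst h; simp at hn
    have hk : 0 < ll.length := List.length_pos_of_ne_nil hllne
    have hprevlen : prev.length = ll.length :=
      mem_pyZip_length ll prev (PySem.List.mem_of_pyGet?_eq_some _ hget)
    have hrestlen : ∀ r ∈ PySem.List.slice (pyZip ll) (some (start + 1)) none, r.length = ll.length :=
      fun r hr => mem_pyZip_length ll r (PySem.List.mem_of_mem_slice _ _ _ hr)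
    dsimp only
    rw [PySem.List.slice_from_one]
    have htail : (prev :: PySem.List.slice (pyZip ll) (some (start + 1)) none).tail =
        PySem.List.slice (pyZip ll) (some (start + 1)) none := rfl
    rw [htail]
    rw [bFold sentinel ll.length
      ((prev :: PySem.List.slice (pyZip ll) (some (start + 1)) none).zip
        (PySem.List.slice (pyZip ll) (some (start + 1)) none)) ll.length]
    rw [pyZip_cols sentinel ll.length hk]
    rw [aOuter_spec ll.length sentinel hk _ prev _ hprevlen hrestlen]

-- ===== VERDICT (by name: the statement is the Claim_ definition above) =====
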